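-- pv_equiv track=rewrite | github.com/Suman-Git-DS/ContextDriftAnalyzer | src/context_drift_analyzer/context/explainer.py | _fuzzy_overlap
-- ===== SOURCE A (Python) =====
-- def _fuzzy_overlap(set_a: set[str], set_b: set[str]) -> set[str]:
--     """Find words that match exactly or share a common stem (prefix >= 4 chars)."""
--     matched = set_a & set_b  # exact matches
--     remaining_a = set_a - matched
--     remaining_b = set_b - matched
--     for word_a in remaining_a:
--         for word_b in remaining_b:
--             # Check if one is a prefix of the other (handles offer/offers, account/accounts, etc.)
--             if len(word_a) >= 4 and len(word_b) >= 4: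
--                 if word_a.startswith(word_b[:4]) or word_b.startswith(word_a[:4]):
--                     matched.add(word_a)
--                     break
--     return matched
-- ===== SOURCE B (Python) =====
-- def _fuzzy_overlap(set_a: set[str], set_b: set[str]) -> set[str]:
--     """Words matching exactly or sharing a 4-char stem, via a precomputed stem pool."""
--     matched = set_a & set_b
--     remaining_a = set_a - matched
--     remaining_b = set_b - matched
--     b_stems = {w[:4] for w in remaining_b if len(w) >= 4}
--     matched |= {w for w in remaining_a if len(w) >= 4 and w[:4] in b_stems}
--     return matched
-- ===== Notes on version B (the rewrite author's own statement) =====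
-- stated objective: faster
-- what changed: Replaces the quadratic nested scan (each remaining a-word tested against every remaining b-word with two startswith calls) by building the set of 4-char stems of remaining_b once and doing a single O(1) stem-membership pass over remaining_a.
import Mathlib
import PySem

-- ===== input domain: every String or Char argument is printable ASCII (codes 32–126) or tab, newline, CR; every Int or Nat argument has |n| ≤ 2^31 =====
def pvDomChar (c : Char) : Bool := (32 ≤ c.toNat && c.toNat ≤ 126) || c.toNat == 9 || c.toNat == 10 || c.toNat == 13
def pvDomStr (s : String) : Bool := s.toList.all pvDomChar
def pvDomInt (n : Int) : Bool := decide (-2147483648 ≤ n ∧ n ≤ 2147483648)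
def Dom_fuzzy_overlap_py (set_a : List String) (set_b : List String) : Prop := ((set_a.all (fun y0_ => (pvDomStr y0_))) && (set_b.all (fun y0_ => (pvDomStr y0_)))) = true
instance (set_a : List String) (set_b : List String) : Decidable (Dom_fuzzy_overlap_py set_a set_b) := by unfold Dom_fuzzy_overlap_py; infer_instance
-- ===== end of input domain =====

-- B replaces A's quadratic nested scan over remaining word pairs by a precomputed pool of
-- 4-char stems of remaining_b and a single membership pass over remaining_a (faster; return-value equivalence).


-- ===== PORT A =====
-- inner 'for word_b in remaining_b: … break' loop of A
def pvInnerA (matched : PySem.Set String) (word_a : String) : List String → PySem.Set String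
  | [] => matched
  | word_b :: rest =>
      if 4 ≤ PySem.Str.len word_a ∧ 4 ≤ PySem.Str.len word_b then
        if PySem.Str.startswith word_a (PySem.Str.slice word_b none (some 4))
            || PySem.Str.startswith word_b (PySem.Str.slice word_a none (some 4)) then
          PySem.Set.add matched word_a
        else pvInnerA matched word_a rest
      else pvInnerA matched word_a rest

def fuzzy_overlap_py (set_a : List String) (set_b : List String) : List String :=
  let sa := PySem.Set.ofList set_a
  let sb := PySem.Set.ofList set_b
  let matched := PySem.Set.inter sa sb
  let remaining_a := PySem.Set.diff sa matched
  let remaining_b := PySem.Set.diff sb matched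
  remaining_a.foldl (fun m word_a => pvInnerA m word_a remaining_b) matched

-- ===== PORT B =====
-- w[:4]
def pvStem (w : String) : String := PySem.Str.slice w none (some 4)

def fuzzy_overlap_py_alt (set_a : List String) (set_b : List String) : List String :=
  let sa := PySem.Set.ofList set_a
  let sb := PySem.Set.ofList set_b
  let matched := PySem.Set.inter sa sb
  let remaining_a := PySem.Set.diff sa matched
  let remaining_b := PySem.Set.diff sb matched
  let bStems : PySem.Set String :=
    PySem.Set.ofList ((remaining_b.filter (fun w => decide (4 ≤ PySem.Str.len w))).map pvStem)
  PySem.Set.union matched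
    (PySem.Set.ofList (remaining_a.filter
      (fun w => decide (4 ≤ PySem.Str.len w) && PySem.Set.contains bStems (pvStem w))))

-- ===== PRECONDITION & SPEC =====
def Spec_fuzzy_overlap_py (set_a : List String) (set_b : List String) (out : List String) : Prop := out = fuzzy_overlap_py_alt set_a set_b
instance (set_a : List String) (set_b : List String) (out : List String) : Decidable (Spec_fuzzy_overlap_py set_a set_b out) := by unfold Spec_fuzzy_overlap_py; infer_instance

-- ===== CLAIM (what is proved, stated in full; the proofs are below) =====
def Claim_equal_fuzzy_overlap_py : Prop := ∀ (set_a : List String) (set_b : List String), Dom_fuzzy_overlap_py set_a set_b → Spec_fuzzy_overlap_py set_a set_b (fuzzy_overlap_py set_a set_b)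

-- ===== LEMMAS AND PROOFS =====

-- A's pair test as a Boolean predicate on word_a (used only by the proofs)
def pvCondA (rb : List String) (wa : String) : Bool :=
  rb.any (fun wb => decide (4 ≤ PySem.Str.len wa ∧ 4 ≤ PySem.Str.len wb)
      && (PySem.Str.startswith wa (PySem.Str.slice wb none (some 4))
          || PySem.Str.startswith wb (PySem.Str.slice wa none (some 4))))

lemma pvSlice4 (t : String) : PySem.List.slice t.toList none (some 4) = t.toList.take 4 := by
  rw [PySem.List.slice_to t.toList (by norm_num : (0:Int) ≤ (4:Int))]
  rfl

lemma pvSliceStr (s : String) : (PySem.Str.slice s none (some 4)).toList = s.toList.take 4 := by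
  simp only [PySem.Str.slice, String.toList_ofList, PySem.Chars.slice_eq_listSlice]
  exact pvSlice4 s

-- for words of length ≥ 4 the two startswith tests both say: equal 4-char stems
lemma pvStem_cond (wa wb : String) (ha : 4 ≤ PySem.Str.len wa) (hb : 4 ≤ PySem.Str.len wb) :
    (PySem.Str.startswith wa (PySem.Str.slice wb none (some 4))
      || PySem.Str.startswith wb (PySem.Str.slice wa none (some 4))) = true
    ↔ pvStem wb = pvStem wa := by
  have hla : 4 ≤ wa.toList.length := by rw [PySem.Str.len_eq] at ha; exact_mod_cast ha
  have hlb : 4 ≤ wb.toList.length := by rw [PySem.Str.len_eq] at hb; exact_mod_cast hb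
  have l1 : (wb.toList.take 4).length = 4 := by rw [List.length_take]; omega
  have l2 : (wa.toList.take 4).length = 4 := by rw [List.length_take]; omega
  constructor
  · intro h
    rw [← String.toList_inj, pvStem, pvStem, pvSliceStr, pvSliceStr]
    rcases Bool.or_eq_true_iff.mp h with h | h
    · rw [PySem.Str.startswith_eq] at h
      have h' := (PySem.Chars.startswith_iff _ _).mp h
      rw [pvSliceStr, List.prefix_iff_eq_take, l1] at h'
      exact h'
    · rw [PySem.Str.startswith_eq] at h
      have h' := (PySem.Chars.startswith_iff _ _).mp h
      rw [pvSliceStr, List.prefix_iff_eq_take, l2] at h'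
      exact h'.symm
  · intro h
    have h' : wb.toList.take 4 = wa.toList.take 4 := by
      have hh := congrArg String.toList h
      rwa [pvStem, pvStem, pvSliceStr, pvSliceStr] at hh
    apply Bool.or_eq_true_iff.mpr
    left
    rw [PySem.Str.startswith_eq]
    apply (PySem.Chars.startswith_iff _ _).mpr
    rw [pvSliceStr, List.prefix_iff_eq_take, l1]
    exact h'

-- the inner loop adds word_a iff some remaining b-word passes A's pair test
lemma pvInnerA_eq (wa : String) (m : PySem.Set String) :
    ∀ rb : List String,
      pvInnerA m wa rb = if pvCondA rb wa then PySem.Set.add m wa else m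
  | [] => by simp [pvInnerA, pvCondA]
  | wb :: rest => by
      have hc : pvCondA (wb :: rest) wa
          = ((decide (4 ≤ PySem.Str.len wa ∧ 4 ≤ PySem.Str.len wb)
              && (PySem.Str.startswith wa (PySem.Str.slice wb none (some 4))
                  || PySem.Str.startswith wb (PySem.Str.slice wa none (some 4))))
             || pvCondA rest wa) := by
        simp only [pvCondA, List.any_cons]
      simp only [pvInnerA]
      rw [pvInnerA_eq wa m rest, hc]
      by_cases h1 : 4 ≤ PySem.Str.len wa ∧ 4 ≤ PySem.Str.len wb
      · rw [if_pos h1, decide_eq_true h1, Bool.true_and]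
        by_cases h2 : (PySem.Str.startswith wa (PySem.Str.slice wb none (some 4))
            || PySem.Str.startswith wb (PySem.Str.slice wa none (some 4))) = true
        · rw [if_pos h2, h2, Bool.true_or, if_pos rfl]
        · have h2' : (PySem.Str.startswith wa (PySem.Str.slice wb none (some 4))
              || PySem.Str.startswith wb (PySem.Str.slice wa none (some 4))) = false :=
            Bool.eq_false_iff.mpr h2
          rw [if_neg h2, h2', Bool.false_or]
      · rw [if_neg h1, decide_eq_false h1, Bool.false_and, Bool.false_or]

-- A's pair test over remaining_b equals B's stem-pool membership test
lemma pvCond_eq (rb : List String) (wa : String) :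
    pvCondA rb wa
    = (decide (4 ≤ PySem.Str.len wa)
        && PySem.Set.contains
            (PySem.Set.ofList ((rb.filter (fun w => decide (4 ≤ PySem.Str.len w))).map pvStem))
            (pvStem wa)) := by
  apply Bool.eq_iff_iff.mpr
  rw [pvCondA, List.any_eq_true, Bool.and_eq_true, decide_eq_true_eq,
    PySem.Set.contains_iff, PySem.Set.mem_ofList, List.mem_map]
  constructor
  · rintro ⟨wb, hmem, hb⟩
    rw [Bool.and_eq_true, decide_eq_true_eq] at hb
    obtain ⟨⟨ha, hlb⟩, hsw⟩ := hb
    exact ⟨ha, ⟨wb, List.mem_filter.mpr ⟨hmem, decide_eq_true hlb⟩,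
      (pvStem_cond wa wb ha hlb).mp hsw⟩⟩
  · rintro ⟨ha, wb, hwb, hst⟩
    obtain ⟨hmem, hfil⟩ := List.mem_filter.mp hwb
    have hlb : 4 ≤ PySem.Str.len wb := of_decide_eq_true hfil
    refine ⟨wb, hmem, ?_⟩
    rw [Bool.and_eq_true, decide_eq_true_eq]
    exact ⟨⟨ha, hlb⟩, (pvStem_cond wa wb ha hlb).mpr hst⟩

-- A's outer fold, with the inner loop replaced by its characterisation
lemma pvFoldA_eq (rb : List String) : ∀ (ra : List String) (s : PySem.Set String),
    ra.foldl (fun m word_a => pvInnerA m word_a rb) s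
    = ra.foldl (fun m wa => if pvCondA rb wa then PySem.Set.add m wa else m) s
  | [], _ => rfl
  | wa :: rest, s => by
      simp only [List.foldl_cons]
      rw [pvInnerA_eq wa s rb, pvFoldA_eq rb rest _]

-- guarded insertion fold over a duplicate-free list disjoint from the accumulator appends the filter
lemma pvFold_guarded (p : String → Bool) :
    ∀ (ra s : List String), ra.Nodup → (∀ x ∈ ra, x ∉ s) →
      ra.foldl (fun m wa => if p wa then PySem.Set.add m wa else m) s = s ++ ra.filter p
  | [], s, _, _ => by simp
  | wa :: rest, s, hnd, hdis => by
      have hwa : wa ∉ s := hdis wa (by simp)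
      have hrest : rest.Nodup := (List.nodup_cons.mp hnd).2
      have hwarest : wa ∉ rest := (List.nodup_cons.mp hnd).1
      by_cases hp : p wa = true
      · have hadd : PySem.Set.add s wa = s ++ [wa] := by
          simp only [PySem.Set.add]
          rw [if_neg]
          simp [hwa]
        have hdis' : ∀ x ∈ rest, x ∉ s ++ [wa] := by
          intro x hx
          simp only [List.mem_append, List.mem_singleton]
          rintro (h | rfl)
          · exact hdis x (by simp [hx]) h
          · exact hwarest hx
        simp only [List.foldl_cons, if_pos hp, hadd,
          pvFold_guarded p rest (s ++ [wa]) hrest hdis']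
        simp [hp]
      · simp only [List.foldl_cons, if_neg hp,
          pvFold_guarded p rest s hrest (fun x hx => hdis x (by simp [hx]))]
        simp [hp]

-- plain insertion fold: same, with no guard
lemma pvFold_add (L s : List String) (hnd : L.Nodup) (hdis : ∀ x ∈ L, x ∉ s) :
    List.foldl PySem.Set.add s L = s ++ L := by
  have h := pvFold_guarded (fun _ => true) L s hnd hdis
  simpa using h

lemma pvOfList_nodup (L : List String) (hnd : L.Nodup) : PySem.Set.ofList L = L := by
  rw [PySem.Set.ofList_eq_foldl, pvFold_add L [] hnd (by simp)]
  simp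

-- ===== VERDICT (by name: the statement is the Claim_ definition above) =====
theorem fuzzy_overlap_py_spec : Claim_equal_fuzzy_overlap_py := by
  unfold Claim_equal_fuzzy_overlap_py Spec_fuzzy_overlap_py
  intro set_a set_b _
  simp only [fuzzy_overlap_py, fuzzy_overlap_py_alt]
  set sa := PySem.Set.ofList set_a with hsa
  set M := PySem.Set.inter sa (PySem.Set.ofList set_b) with hM
  set ra := PySem.Set.diff sa M with hra
  set rb := PySem.Set.diff (PySem.Set.ofList set_b) M with hrb
  have hnd_ra : ra.Nodup := by
    rw [hra, hsa]
    unfold PySem.Set.diff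
    exact (PySem.Set.nodup_ofList set_a).filter _
  have hdis_ra : ∀ x ∈ ra, x ∉ M := by
    intro x hx
    rw [hra] at hx
    unfold PySem.Set.diff at hx
    have hx2 := (List.mem_filter.mp hx).2
    intro hxm
    rw [(PySem.Set.contains_iff M x).mpr hxm] at hx2
    simp at hx2
  rw [pvFoldA_eq rb ra M,
    pvFold_guarded (fun wa => pvCondA rb wa) ra M hnd_ra hdis_ra]
  have hfilter_nd : (ra.filter (fun w => decide (4 ≤ PySem.Str.len w)
      && PySem.Set.contains (PySem.Set.ofList ((rb.filter
          (fun w => decide (4 ≤ PySem.Str.len w))).map pvStem)) (pvStem w))).Nodup :=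
    hnd_ra.filter _
  unfold PySem.Set.union PySem.Set.update
  rw [pvOfList_nodup _ hfilter_nd,
    pvFold_add _ M hfilter_nd (fun x hx => hdis_ra x (List.mem_filter.mp hx).1)]
  congr 1
  exact List.filter_congr (fun x _ => pvCond_eq rb x)
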